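-- pv_equiv track=rewrite | github.com/Muxucao0812/ScaleOutKeyswitch | CinnamonHLS/python/cinnamon_fpga/parser.py | _small_cyclic_dft
-- ===== SOURCE A (Python) =====
-- from typing import Dict, Iterable, Iterator, List, Sequence
--
-- def _mod_add(a: int, b: int, mod: int) -> int:
--     aa = a % mod
--     bb = b % mod
--     s = aa + bb
--     return s - mod if s >= mod else s
--
-- def _mod_mul(a: int, b: int, mod: int) -> int:
--     return ((a % mod) * (b % mod)) % mod
--
-- def _small_cyclic_dft(input_values: Sequence[int], length: int, root: int, mod: int) -> List[int]:
--     out = [0] * length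
--     for k in range(length):
--         step = pow(root, k, mod)
--         tw = 1
--         acc = 0
--         for n in range(length):
--             acc = _mod_add(acc, _mod_mul(input_values[n], tw, mod), mod)
--             tw = _mod_mul(tw, step, mod)
--         out[k] = acc
--     return out
-- ===== SOURCE B (Python) =====
-- from typing import List, Sequence
--
--
-- def _small_cyclic_dft(input_values: Sequence[int], length: int, root: int, mod: int) -> List[int]:
--     out = []
--     for k in range(length):
--         x = pow(root, k, mod)
--         acc = 0
--         for n in reversed(range(length)):
--             acc = (acc * x + input_values[n]) % mod
--         out.append(acc)
--     return out
-- ===== Notes on version B (the rewrite author's own statement) =====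
-- stated objective: simpler
-- what changed: Each output coefficient is Horner's rule with a single accumulator over the input high-to-low at x = pow(root,k,mod), replacing the forward twiddle-power/accumulator pair and the _mod_add/_mod_mul helper reductions.
-- outside the precondition, e.g. on _small_cyclic_dft([1, 2, 3], 3, 2, -5): A returns [1, 2, 2], B returns [-4, -3, -3]
import Mathlib
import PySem

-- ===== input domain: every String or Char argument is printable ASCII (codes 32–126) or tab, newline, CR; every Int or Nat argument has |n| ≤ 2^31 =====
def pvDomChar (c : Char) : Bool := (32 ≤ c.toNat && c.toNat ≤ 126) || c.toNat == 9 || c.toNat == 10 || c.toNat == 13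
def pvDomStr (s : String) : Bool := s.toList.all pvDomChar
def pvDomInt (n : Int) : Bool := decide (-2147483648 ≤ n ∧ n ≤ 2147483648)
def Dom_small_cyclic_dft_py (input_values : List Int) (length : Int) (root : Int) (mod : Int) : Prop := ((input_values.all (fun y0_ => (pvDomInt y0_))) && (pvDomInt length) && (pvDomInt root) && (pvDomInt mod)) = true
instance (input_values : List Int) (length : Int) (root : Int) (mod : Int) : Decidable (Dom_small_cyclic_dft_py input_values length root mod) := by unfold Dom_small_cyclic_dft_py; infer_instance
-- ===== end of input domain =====

-- B computes each DFT coefficient by Horner's rule with a single accumulator instead of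
-- A's forward twiddle-power/accumulator pair with helper reductions (objective: simpler).


-- ===== PORT A =====
-- _mod_add (exact: PySem.Int.mod is Python's %)
def pvModAdd (a b m : Int) : Int :=
  let aa := PySem.Int.mod a m
  let bb := PySem.Int.mod b m
  let s := aa + bb
  if s ≥ m then s - m else s

-- _mod_mul
def pvModMul (a b m : Int) : Int :=
  PySem.Int.mod (PySem.Int.mod a m * PySem.Int.mod b m) m

-- pow(root, k, mod) is PySem.Int.powMod; k comes from range(length) so k ≥ 0 and k.toNat is exact.
-- input_values[n] is pyGetD with default 0: n is in range under Pre_ (length ≤ len(input_values)).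
def small_cyclic_dft_py (input_values : List Int) (length : Int) (root : Int) (mod : Int) : List Int :=
  let out := List.replicate length.toNat (0 : Int)
  (PySem.List.pyRange 0 length 1).foldl (fun out k =>
    let step := PySem.Int.powMod root k.toNat mod
    let r := (PySem.List.pyRange 0 length 1).foldl
      (fun (st : Int × Int) n =>
        (pvModMul st.1 step mod,
         pvModAdd st.2 (pvModMul (PySem.List.pyGetD input_values n 0) st.1 mod) mod))
      (1, 0)
    out.set k.toNat r.2) out

-- ===== PORT B =====
-- reversed(range(length)) is (pyRange 0 length 1).reverse; out.append(acc) is out ++ [acc].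
def small_cyclic_dft_py_alt (input_values : List Int) (length : Int) (root : Int) (mod : Int) : List Int :=
  (PySem.List.pyRange 0 length 1).foldl (fun out k =>
    let x := PySem.Int.powMod root k.toNat mod
    let acc := (PySem.List.pyRange 0 length 1).reverse.foldl
      (fun acc n => PySem.Int.mod (acc * x + PySem.List.pyGetD input_values n 0) mod) 0
    out ++ [acc]) []

-- ===== PRECONDITION & SPEC =====
-- Pre_ excludes length > len(input_values), where A raises IndexError, and mod ≤ 0 when
-- length > 0: there mod = 0 raises ValueError in pow, and a negative modulus is a corner no
-- caller of a modular DFT would specify, on which A's conditional-subtraction _mod_add and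
-- B's plain % return different, equally accidental residue conventions.
def Pre_small_cyclic_dft_py (input_values : List Int) (length : Int) (root : Int) (mod : Int) : Prop :=
  (0 < mod ∨ length ≤ 0) ∧ length ≤ (input_values.length : Int)

instance (input_values : List Int) (length : Int) (root : Int) (mod : Int) : Decidable (Pre_small_cyclic_dft_py input_values length root mod) := by unfold Pre_small_cyclic_dft_py; infer_instance

def pvWitness_small_cyclic_dft_py : List Int × Int × Int × Int := ([1, 2, 3], 3, 2, 5)

def Spec_small_cyclic_dft_py (input_values : List Int) (length : Int) (root : Int) (mod : Int) (out : List Int) : Prop := out = small_cyclic_dft_py_alt input_values length root mod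
instance (input_values : List Int) (length : Int) (root : Int) (mod : Int) (out : List Int) : Decidable (Spec_small_cyclic_dft_py input_values length root mod out) := by unfold Spec_small_cyclic_dft_py; infer_instance

-- ===== CLAIM (what is proved, stated in full; the proofs are below) =====
def Claim_equal_small_cyclic_dft_py : Prop := ∀ (input_values : List Int) (length : Int) (root : Int) (mod : Int), Dom_small_cyclic_dft_py input_values length root mod → Pre_small_cyclic_dft_py input_values length root mod → Spec_small_cyclic_dft_py input_values length root mod (small_cyclic_dft_py input_values length root mod)

-- ===== LEMMAS AND PROOFS =====

-- integer value of the polynomial Σ V n * x^position over a list of indices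
def pvPoly (V : Int → Int) (x : Int) : List Int → Int
  | [] => 0
  | n :: l => V n + x * pvPoly V x l

theorem pvModAdd_eq {m : Int} (hm : 0 < m) (a b : Int) : pvModAdd a b m = (a + b) % m := by
  simp only [pvModAdd, PySem.Int.mod_eq_emod_of_pos hm]
  have hm0 : m ≠ 0 := by omega
  have ha0 : 0 ≤ a % m := Int.emod_nonneg a hm0
  have ha1 : a % m < m := Int.emod_lt_of_pos a hm
  have hb0 : 0 ≤ b % m := Int.emod_nonneg b hm0
  have hb1 : b % m < m := Int.emod_lt_of_pos b hm
  rw [Int.add_emod a b]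
  split_ifs with h
  · have h2 : (a % m + b % m) % m = (a % m + b % m - m) % m := by
      rw [Int.sub_emod, Int.emod_self, sub_zero, Int.emod_emod_of_dvd _ dvd_rfl]
    rw [h2]
    exact (Int.emod_eq_of_lt (by omega) (by omega)).symm
  · exact (Int.emod_eq_of_lt (by omega) (by omega)).symm

theorem pvModMul_eq {m : Int} (hm : 0 < m) (a b : Int) : pvModMul a b m = (a * b) % m := by
  unfold pvModMul
  rw [PySem.Int.mod_eq_emod_of_pos hm, PySem.Int.mod_eq_emod_of_pos hm,
    PySem.Int.mod_eq_emod_of_pos hm, ← Int.mul_emod]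

-- (P % m) propagation lemmas for a positive modulus
theorem pv_addr {m : Int} (a b : Int) : (a + b % m) % m = (a + b) % m := by
  conv_rhs => rw [Int.add_emod]
  conv_lhs => rw [Int.add_emod, Int.emod_emod_of_dvd _ dvd_rfl]

theorem pv_mix {m : Int} (u c P : Int) : (u % m + (c % m) * P) % m = (u + c * P) % m := by
  conv_rhs => rw [Int.add_emod, Int.mul_emod]
  conv_lhs => rw [Int.add_emod, Int.emod_emod_of_dvd _ dvd_rfl, Int.mul_emod,
    Int.emod_emod_of_dvd _ dvd_rfl]

theorem pv_step {m : Int} (P v x : Int) : ((P % m) * x + v) % m = (P * x + v) % m := by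
  conv_rhs => rw [Int.add_emod, Int.mul_emod]
  conv_lhs => rw [Int.add_emod, Int.mul_emod, Int.emod_emod_of_dvd _ dvd_rfl]

-- A's inner loop: forward twiddle accumulation equals the reduced polynomial value.
theorem pvA_inner (V : Int → Int) (x m : Int) (hm : 0 < m) :
    ∀ (l : List Int) (t a : Int), a % m = a →
      ((l.foldl (fun (st : Int × Int) n =>
          (pvModMul st.1 x m, pvModAdd st.2 (pvModMul (V n) st.1 m) m)) (t, a)).2)
        = (a + t * pvPoly V x l) % m := by
  intro l
  induction l with
  | nil => intro t a ha; simpa [pvPoly] using ha.symm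
  | cons n l ih =>
    intro t a ha
    have step : (l.foldl (fun (st : Int × Int) n =>
        (pvModMul st.1 x m, pvModAdd st.2 (pvModMul (V n) st.1 m) m))
        (pvModMul t x m, pvModAdd a (pvModMul (V n) t m) m)).2
        = (pvModAdd a (pvModMul (V n) t m) m + pvModMul t x m * pvPoly V x l) % m := by
      apply ih
      rw [pvModAdd_eq hm, Int.emod_emod_of_dvd _ dvd_rfl]
    simp only [List.foldl_cons, step, pvPoly]
    rw [pvModAdd_eq hm, pvModMul_eq hm, pvModMul_eq hm, pv_addr, pv_mix]
    congr 1; ring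

-- B's inner loop: Horner over the reversed index list equals the reduced polynomial value.
theorem pvB_inner (V : Int → Int) (x m : Int) (hm : 0 < m) :
    ∀ l : List Int,
      (l.foldr (fun n acc => PySem.Int.mod (acc * x + V n) m) 0) = pvPoly V x l % m := by
  intro l
  induction l with
  | nil => simp [pvPoly]
  | cons n l ih =>
    rw [List.foldr_cons, ih, PySem.Int.mod_eq_emod_of_pos hm, pv_step]
    show (pvPoly V x l * x + V n) % m = pvPoly V x (n :: l) % m
    rw [pvPoly]; congr 1; ring

-- writing out[k] := F k for k over range L into [0]*L produces the mapped list
theorem pvFoldSet_get (F : Nat → Int) :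
    ∀ (ks : List Nat) (o : List Int) (i : Nat), (∀ k ∈ ks, k < o.length) →
      (ks.foldl (fun o k => o.set k (F k)) o)[i]? = if i ∈ ks then some (F i) else o[i]? := by
  intro ks
  induction ks with
  | nil => intro o i _; simp
  | cons k ks ih =>
    intro o i hk
    have hkl : k < o.length := hk k (by simp)
    rw [List.foldl_cons, ih _ i (by intro j hj; simpa using hk j (by simp [hj]))]
    by_cases hi : i ∈ ks
    · simp [hi]
    · by_cases hik : i = k
      · subst hik; simp [hi, hkl]
      · simp [hi, hik, (show ¬ k = i from fun h => hik h.symm)]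

theorem pvFoldSet_eq_map (F : Nat → Int) (L : Nat) :
    ((List.range L).foldl (fun o k => o.set k (F k)) (List.replicate L (0 : Int)))
      = (List.range L).map F := by
  apply List.ext_getElem?
  intro i
  rw [pvFoldSet_get F _ _ i (by intro k hk; simpa using List.mem_range.mp hk)]
  by_cases hi : i < L
  · simp [List.mem_range, hi]
  · simp [List.mem_range, hi]

-- glue: writing entries into [0]*length over range(length) equals appending them in order
theorem pvGlue (Fa Fb : Int → Int) (L : Int) (h : ∀ k, Fa k = Fb k) :
    (PySem.List.pyRange 0 L 1).foldl (fun o k => o.set k.toNat (Fa k)) (List.replicate L.toNat 0)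
      = (PySem.List.pyRange 0 L 1).foldl (fun o k => o ++ [Fb k]) [] := by
  rw [PySem.List.foldl_append_singleton_eq_map, PySem.List.pyRange_one]
  simp only [List.foldl_map, List.map_map, zero_add, Int.toNat_natCast, sub_zero, List.nil_append,
    Function.comp_def]
  rw [pvFoldSet_eq_map]
  exact List.map_congr_left fun k _ => h _

-- ===== VERDICT (by name: the statement is the Claim_ definition above) =====
theorem small_cyclic_dft_py_spec : Claim_equal_small_cyclic_dft_py := by
  intro input_values length root mod _ hpre
  obtain ⟨hcase, -⟩ := hpre
  rcases hcase with hm | hnil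
  case inr =>
    -- length ≤ 0: range(length) is empty and [0]*length is empty, so both return []
    unfold Spec_small_cyclic_dft_py small_cyclic_dft_py small_cyclic_dft_py_alt
    rw [PySem.List.pyRange_one_eq_nil hnil]
    simp [Int.toNat_of_nonpos hnil]
  unfold Spec_small_cyclic_dft_py small_cyclic_dft_py small_cyclic_dft_py_alt
  set V : Int → Int := fun n => PySem.List.pyGetD input_values n 0 with hV
  set R := PySem.List.pyRange 0 length 1 with hR
  -- the per-k entries of the two programs coincide
  have entry : ∀ k : Int,
      ((R.foldl (fun (st : Int × Int) n =>
          (pvModMul st.1 (PySem.Int.powMod root k.toNat mod) mod,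
           pvModAdd st.2 (pvModMul (V n) st.1 mod) mod)) (1, 0)).2)
        = R.reverse.foldl
            (fun acc n => PySem.Int.mod (acc * (PySem.Int.powMod root k.toNat mod) + V n) mod) 0 := by
    intro k
    rw [List.foldl_reverse, pvB_inner V _ mod hm R,
      pvA_inner V (PySem.Int.powMod root k.toNat mod) mod hm R 1 0 (Int.zero_emod mod)]
    norm_num
  exact pvGlue _ _ length entry
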